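-- pv_equiv track=rewrite | github.com/egrandmaison89/luminate-email-banners | pagebuilder_decomposer_lib.py | calculate_inclusion_status
-- ===== SOURCE A (Python) =====
-- from typing import Dict, List, Set, Optional, Callable, Tuple
--
-- def calculate_inclusion_status(hierarchy: Dict[str, List[str]], main_pagename: str,
--                               ignore_pagebuilders: Optional[List[str]] = None) -> Dict[str, bool]:
--     """
--     Calculate which PageBuilders should be included (True) or excluded (False).
--     A PageBuilder is excluded if it appears as a descendant of any ignored PageBuilder.
--     A PageBuilder is included only if it does NOT appear under any ignored PageBuilder.
--     """
--     if ignore_pagebuilders is None: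
--         ignore_pagebuilders = []
--     ignore_set = set(ignore_pagebuilders)
--
--     # Track which PageBuilders are descendants of ignored PageBuilders
--     excluded_by_ignored = set()
--
--     def mark_excluded_from_ignored(pagename: str):
--         """Recursively mark PageBuilder and all its descendants as excluded."""
--         if pagename in excluded_by_ignored:
--             return  # Already processed
--
--         excluded_by_ignored.add(pagename)
--
--         # Mark all children as excluded
--         for child in hierarchy.get(pagename, []):
--             mark_excluded_from_ignored(child)
--
--     # Mark all ignored PageBuilders and their descendants as excluded
--     for ignored_pb in ignore_set:
--         if ignored_pb in hierarchy or ignored_pb == main_pagename: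
--             mark_excluded_from_ignored(ignored_pb)
--
--     # Build inclusion map: True if included, False if excluded
--     inclusion_map = {}
--     all_pagebuilders = set([main_pagename])
--     for children in hierarchy.values():
--         all_pagebuilders.update(children)
--
--     for pagename in all_pagebuilders:
--         if pagename in ignore_set:
--             inclusion_map[pagename] = False  # Ignored PageBuilders are always excluded
--         elif pagename in excluded_by_ignored:
--             inclusion_map[pagename] = False  # Descendants of ignored PageBuilders are excluded
--         else:
--             inclusion_map[pagename] = True  # All others are included
--
--     return inclusion_map
-- ===== SOURCE B (Python) =====
-- def calculate_inclusion_status(hierarchy, main_pagename, ignore_pagebuilders=None):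
--     """Iterative version: an explicit stack replaces the recursive descendant marking."""
--     ignore_set = set(ignore_pagebuilders) if ignore_pagebuilders is not None else set()
--
--     excluded = set()
--     stack = [pb for pb in ignore_set if pb in hierarchy or pb == main_pagename]
--     stack.reverse()  # process roots in list order; push children reversed so they pop in order
--     while stack:
--         node = stack.pop()
--         if node in excluded:
--             continue
--         excluded.add(node)
--         stack.extend(reversed(hierarchy.get(node, [])))
--
--     all_pagebuilders = {main_pagename}
--     for children in hierarchy.values():
--         all_pagebuilders.update(children)
--
--     return {pb: pb not in ignore_set and pb not in excluded for pb in all_pagebuilders}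
-- ===== Notes on version B (the rewrite author's own statement) =====
-- stated objective: alternative
-- what changed: The recursive mark_excluded_from_ignored helper is replaced by an explicit stack-based worklist loop that marks ignored pagebuilders and their descendants iteratively; the inclusion map is built by a comprehension over the same collected set.
import Mathlib
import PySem

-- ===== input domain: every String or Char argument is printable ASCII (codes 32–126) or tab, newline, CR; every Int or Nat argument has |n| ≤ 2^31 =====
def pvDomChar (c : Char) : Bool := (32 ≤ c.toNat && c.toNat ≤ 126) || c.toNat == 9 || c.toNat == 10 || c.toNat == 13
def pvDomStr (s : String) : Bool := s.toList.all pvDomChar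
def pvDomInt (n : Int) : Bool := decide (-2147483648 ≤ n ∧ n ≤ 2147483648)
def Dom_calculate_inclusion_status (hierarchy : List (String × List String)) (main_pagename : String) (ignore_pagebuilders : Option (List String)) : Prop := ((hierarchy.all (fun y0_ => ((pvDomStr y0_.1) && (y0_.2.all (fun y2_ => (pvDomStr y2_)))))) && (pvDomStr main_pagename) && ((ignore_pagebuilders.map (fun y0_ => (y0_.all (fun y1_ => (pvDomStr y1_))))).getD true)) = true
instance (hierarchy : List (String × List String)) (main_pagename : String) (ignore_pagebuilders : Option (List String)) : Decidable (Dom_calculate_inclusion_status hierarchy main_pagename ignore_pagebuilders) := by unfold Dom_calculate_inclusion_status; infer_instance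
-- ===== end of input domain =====

-- B replaces A's recursive descendant-marking helper by an explicit stack-based worklist
-- (objective: alternative — same asymptotic cost, no recursion).

-- ===== PORT A =====
-- mark_excluded_from_ignored: recursive descent ported with fuel; the fuel only bounds the
-- recursion depth (the visited-set guard bounds real depth by the number of dict keys + 1,
-- so the fuel used by the caller is provably never exhausted — see pvA_dfs_eq_loop below).
def pvA_dfs (h : PySem.Dict String (List String)) : Nat → String → PySem.Set String → PySem.Set String
  | 0, _, visited => visited
  | fuel+1, pagename, visited =>
    if visited.contains pagename then visited
    else (h.getD pagename []).foldl (fun acc c => pvA_dfs h fuel c acc) (visited.add pagename)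

def calculate_inclusion_status (hierarchy : List (String × List String)) (main_pagename : String) (ignore_pagebuilders : Option (List String)) : List (String × Bool) :=
  let ign := ignore_pagebuilders.getD []
  let ignore_set : PySem.Set String := PySem.Set.ofList ign
  let h := PySem.Dict.ofList hierarchy
  let fuel := hierarchy.length + 1
  let excluded := ignore_set.foldl
    (fun ex g => if h.contains g || g == main_pagename then pvA_dfs h fuel g ex else ex)
    PySem.Set.empty
  let allpb := h.values.foldl (fun s cs => PySem.Set.update s cs) (PySem.Set.ofList [main_pagename])
  (allpb.foldl
    (fun d p =>
      if ignore_set.contains p then d.insert p false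
      else if excluded.contains p then d.insert p false
      else d.insert p true)
    PySem.Dict.empty).items

-- ===== PORT B =====
-- termination helpers for the worklist loop (cited by name in decreasing_by)
theorem pv_contains_add (v : PySem.Set String) (x k : String) :
    (v.add x).contains k = (v.contains k || k == x) := by
  by_cases hk : k ∈ v.add x
  · rw [(PySem.Set.contains_iff _ _).2 hk]
    rcases (PySem.Set.mem_add v x k).1 hk with h | h
    · rw [(PySem.Set.contains_iff _ _).2 h]; simp
    · simp [h]
  · have h1 : ¬ k ∈ v := fun h => hk ((PySem.Set.mem_add v x k).2 (Or.inl h))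
    have h2 : ¬ k = x := fun h => hk ((PySem.Set.mem_add v x k).2 (Or.inr h))
    rw [Bool.eq_false_iff.2 (fun h => hk ((PySem.Set.contains_iff _ _).1 h)),
        Bool.eq_false_iff.2 (fun h => h1 ((PySem.Set.contains_iff _ _).1 h))]
    simp [h2]

theorem pv_filter_add_eq (h : PySem.Dict String (List String)) (v : PySem.Set String) (x : String)
    (hx : h.contains x = false) :
    h.keys.filter (fun k => !(v.add x).contains k) = h.keys.filter (fun k => !v.contains k) := by
  apply List.filter_congr
  intro k hk
  have hne : k ≠ x := by
    intro he; subst he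
    exact absurd ((PySem.Dict.contains_iff_mem_keys h k).2 hk) (by simp [hx])
  simp [hne]

theorem pv_filter_add_lt (h : PySem.Dict String (List String)) (v : PySem.Set String) (x : String)
    (hx : h.contains x = true) (hv : v.contains x = false) :
    (h.keys.filter (fun k => !(v.add x).contains k)).length
      < (h.keys.filter (fun k => !v.contains k)).length := by
  have himp : ∀ k, (!(v.add x).contains k) = true → (!v.contains k) = true := by
    intro k hkk
    simp only [pv_contains_add, Bool.not_eq_eq_eq_not, Bool.not_true, Bool.or_eq_false_iff] at hkk
    simp only [Bool.not_eq_eq_eq_not, Bool.not_true]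
    exact hkk.1
  have hsub : (h.keys.filter (fun k => !(v.add x).contains k)).Sublist
      (h.keys.filter (fun k => !v.contains k)) := List.monotone_filter_right _ himp
  rcases Nat.lt_or_ge (h.keys.filter (fun k => !(v.add x).contains k)).length
      (h.keys.filter (fun k => !v.contains k)).length with hlt | hge
  · exact hlt
  · exfalso
    have heq := hsub.eq_of_length (Nat.le_antisymm hsub.length_le hge)
    have hxmem : x ∈ h.keys.filter (fun k => !v.contains k) := by
      refine List.mem_filter.2 ⟨(PySem.Dict.contains_iff_mem_keys h x).1 hx, ?_⟩
      simp only [Bool.not_eq_eq_eq_not, Bool.not_true]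
      exact hv
    rw [← heq] at hxmem
    have hmf := (List.mem_filter.1 hxmem).2
    simp at hmf

-- the worklist loop of B (stack top = list head)
def pvB_loop (h : PySem.Dict String (List String)) : List String → PySem.Set String → PySem.Set String
  | [], visited => visited
  | node :: stack, visited =>
    if hc : visited.contains node then pvB_loop h stack visited
    else pvB_loop h (h.getD node [] ++ stack) (visited.add node)
termination_by s v => ((h.keys.filter (fun k => !v.contains k)).length, s.length)
decreasing_by
  · exact Prod.Lex.right _ (Nat.lt_succ_self _)
  · by_cases hx : h.contains node
    · exact Prod.Lex.left _ _ (pv_filter_add_lt h visited node hx (Bool.eq_false_iff.2 hc))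
    · rw [PySem.Dict.getD_of_not_contains h [] (Bool.eq_false_iff.2 hx),
          pv_filter_add_eq h visited node (Bool.eq_false_iff.2 hx)]
      exact Prod.Lex.right _ (Nat.lt_succ_self _)

def calculate_inclusion_status_alt (hierarchy : List (String × List String)) (main_pagename : String) (ignore_pagebuilders : Option (List String)) : List (String × Bool) :=
  let ign := ignore_pagebuilders.getD []
  let ignore_set : PySem.Set String := PySem.Set.ofList ign
  let h := PySem.Dict.ofList hierarchy
  let roots := ignore_set.filter (fun g => h.contains g || g == main_pagename)
  let excluded := pvB_loop h roots PySem.Set.empty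
  let allpb := h.values.foldl (fun s cs => PySem.Set.update s cs) (PySem.Set.ofList [main_pagename])
  allpb.map (fun p => (p, !ignore_set.contains p && !excluded.contains p))

-- ===== PRECONDITION & SPEC =====
def Spec_calculate_inclusion_status (hierarchy : List (String × List String)) (main_pagename : String) (ignore_pagebuilders : Option (List String)) (out : List (String × Bool)) : Prop := out = calculate_inclusion_status_alt hierarchy main_pagename ignore_pagebuilders
instance (hierarchy : List (String × List String)) (main_pagename : String) (ignore_pagebuilders : Option (List String)) (out : List (String × Bool)) : Decidable (Spec_calculate_inclusion_status hierarchy main_pagename ignore_pagebuilders out) := by unfold Spec_calculate_inclusion_status; infer_instance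

-- ===== CLAIM (what is proved, stated in full; the proofs are below) =====
def Claim_equal_calculate_inclusion_status : Prop := ∀ (hierarchy : List (String × List String)) (main_pagename : String) (ignore_pagebuilders : Option (List String)), Dom_calculate_inclusion_status hierarchy main_pagename ignore_pagebuilders → Spec_calculate_inclusion_status hierarchy main_pagename ignore_pagebuilders (calculate_inclusion_status hierarchy main_pagename ignore_pagebuilders)

-- ===== LEMMAS AND PROOFS =====

-- the loop only grows the visited set
theorem pv_loop_mono (h : PySem.Dict String (List String)) (s : List String) (v : PySem.Set String)
    (y : String) (hy : y ∈ v) : y ∈ pvB_loop h s v := by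
  induction s, v using pvB_loop.induct h with
  | case1 v => simpa [pvB_loop] using hy
  | case2 node stack v hc ih => rw [pvB_loop]; simp only [hc, dite_true]; exact ih hy
  | case3 node stack v hc ih =>
    rw [pvB_loop]; simp only [hc]
    exact ih ((PySem.Set.mem_add v node y).2 (Or.inl hy))

theorem pv_loop_append (h : PySem.Dict String (List String)) (s1 : List String) (v : PySem.Set String) :
    ∀ s2, pvB_loop h (s1 ++ s2) v = pvB_loop h s2 (pvB_loop h s1 v) := by
  induction s1, v using pvB_loop.induct h with
  | case1 v => intro s2; rw [pvB_loop]; rfl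
  | case2 node stack v hc ih =>
    intro s2
    rw [List.cons_append, pvB_loop, pvB_loop]
    simp only [hc, dite_true]
    exact ih s2
  | case3 node stack v hc ih =>
    intro s2
    rw [List.cons_append, pvB_loop, pvB_loop]
    simp only [hc]
    rw [← List.append_assoc]
    exact ih s2

theorem pv_loop_filter_le (h : PySem.Dict String (List String)) (s : List String) (v : PySem.Set String) :
    (h.keys.filter (fun k => !(pvB_loop h s v).contains k)).length
      ≤ (h.keys.filter (fun k => !v.contains k)).length := by
  have himp : ∀ k, (!(pvB_loop h s v).contains k) = true → (!v.contains k) = true := by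
    intro k hk
    simp only [Bool.not_eq_eq_eq_not, Bool.not_true] at hk ⊢
    refine Bool.eq_false_iff.2 (fun hmem => ?_)
    have : k ∈ pvB_loop h s v := pv_loop_mono h s v k ((PySem.Set.contains_iff _ _).1 hmem)
    rw [(PySem.Set.contains_iff _ _).2 this] at hk
    exact Bool.noConfusion hk
  exact (List.monotone_filter_right _ himp).length_le

-- the fuelled recursive descent equals the worklist loop once the fuel exceeds the
-- number of dict keys not yet visited
theorem pvA_dfs_eq_loop (h : PySem.Dict String (List String)) :
    ∀ fuel : Nat,
      (∀ (x : String) (v : PySem.Set String),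
        (h.keys.filter (fun k => !v.contains k)).length + 1 ≤ fuel →
        pvA_dfs h fuel x v = pvB_loop h [x] v) ∧
      (∀ (cs : List String) (v : PySem.Set String),
        (h.keys.filter (fun k => !v.contains k)).length + 1 ≤ fuel →
        cs.foldl (fun acc c => pvA_dfs h fuel c acc) v = pvB_loop h cs v) := by
  intro fuel
  induction fuel using Nat.strong_induction_on with
  | _ fuel ih =>
    match fuel with
    | 0 => exact ⟨fun x v hb => by omega, fun cs v hb => by omega⟩
    | f + 1 =>
      have hdfs : ∀ (x : String) (v : PySem.Set String),
          (h.keys.filter (fun k => !v.contains k)).length + 1 ≤ f + 1 →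
          pvA_dfs h (f+1) x v = pvB_loop h [x] v := by
        intro x v hb
        rw [pvA_dfs, pvB_loop]
        by_cases hc : v.contains x
        · simp only [hc, if_true, dite_true]
          rw [pvB_loop]
        · simp only [hc, if_false, dite_false, Bool.false_eq_true]
          by_cases hx : h.contains x
          · have hlt := pv_filter_add_lt h v x hx (Bool.eq_false_iff.2 hc)
            have hb' : (h.keys.filter (fun k => !(v.add x).contains k)).length + 1 ≤ f := by omega
            rw [(ih f (Nat.lt_succ_self f)).2 (h.getD x []) (v.add x) hb']
            rw [List.append_nil]
          · rw [PySem.Dict.getD_of_not_contains h [] (Bool.eq_false_iff.2 hx)]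
            simp only [List.foldl_nil, List.nil_append]
            rw [pvB_loop]
      refine ⟨hdfs, ?_⟩
      intro cs
      induction cs with
      | nil => intro v hb; rw [pvB_loop]; rfl
      | cons c cs ihc =>
        intro v hb
        rw [List.foldl_cons, hdfs c v hb]
        have hb' : (h.keys.filter (fun k => !(pvB_loop h [c] v).contains k)).length + 1 ≤ f + 1 :=
          le_trans (Nat.add_le_add_right (pv_loop_filter_le h [c] v) 1) hb
        rw [ihc (pvB_loop h [c] v) hb']
        rw [← pv_loop_append h [c] v cs]
        rfl

-- keys of the dict built from the association list
theorem pv_keys_ofList (l : List (String × List String)) :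
    (PySem.Dict.ofList l).keys = PySem.Set.ofList (l.map (·.1)) := by
  rw [PySem.Dict.ofList, PySem.Dict.update]
  rw [show (fun (acc : PySem.Dict String (List String)) (p : String × List String) => acc.insert p.1 p.2)
        = (fun d x => d.insert (Prod.fst x) ((fun (_ : PySem.Dict String (List String)) (x : String × List String) => x.2) d x)) from rfl]
  rw [PySem.Dict.keys_foldl_insert_key l Prod.fst _ PySem.Dict.empty]
  rfl

theorem pv_keys_len_le (l : List (String × List String)) :
    (PySem.Dict.ofList l).keys.length ≤ l.length := by
  rw [pv_keys_ofList]
  calc (PySem.Set.ofList (l.map (·.1))).length ≤ (l.map (·.1)).length :=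
        PySem.Set.length_ofList_le _
    _ = l.length := List.length_map _
    _ ≤ l.length := le_refl _

-- the collected all_pagebuilders set has no duplicates
theorem pv_nodup_foldl_update (ls : List (List String)) :
    ∀ s : PySem.Set String, s.Nodup → (ls.foldl (fun s cs => PySem.Set.update s cs) s).Nodup := by
  induction ls with
  | nil => intro s hs; exact hs
  | cons c ls ih => intro s hs; exact ih _ (PySem.Set.nodup_update s c hs)

-- ===== VERDICT (by name: the statement is the Claim_ definition above) =====
theorem calculate_inclusion_status_spec : Claim_equal_calculate_inclusion_status := by
  intro hierarchy main_pagename ignore_pagebuilders _hdom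
  unfold Spec_calculate_inclusion_status calculate_inclusion_status calculate_inclusion_status_alt
  simp only []
  set ign := ignore_pagebuilders.getD [] with hign
  set ignore_set : PySem.Set String := PySem.Set.ofList ign with his
  set h := PySem.Dict.ofList hierarchy with hh
  set allpb := h.values.foldl (fun s cs => PySem.Set.update s cs) (PySem.Set.ofList [main_pagename]) with hall
  -- step 1: the two excluded sets coincide
  have hfuel : (h.keys.filter (fun k => !(PySem.Set.empty (α := String)).contains k)).length + 1
      ≤ hierarchy.length + 1 := by
    have h1 : (h.keys.filter (fun k => !(PySem.Set.empty (α := String)).contains k)).length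
        ≤ h.keys.length := List.length_filter_le _ _
    have h2 : h.keys.length ≤ hierarchy.length := pv_keys_len_le hierarchy
    omega
  have hex : ignore_set.foldl
      (fun ex g => if h.contains g || g == main_pagename then pvA_dfs h (hierarchy.length + 1) g ex else ex)
      PySem.Set.empty
      = pvB_loop h (ignore_set.filter (fun g => h.contains g || g == main_pagename)) PySem.Set.empty := by
    rw [← List.foldl_filter]
    exact (pvA_dfs_eq_loop h (hierarchy.length + 1)).2 _ PySem.Set.empty hfuel
  rw [hex]
  set excluded := pvB_loop h (ignore_set.filter (fun g => h.contains g || g == main_pagename)) PySem.Set.empty with hexs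
  -- step 2: the insert-loop over the distinct pagebuilders is the association list itself
  have hstep : (fun (d : PySem.Dict String Bool) (p : String) =>
        if ignore_set.contains p then d.insert p false
        else if excluded.contains p then d.insert p false
        else d.insert p true)
      = (fun d p => d.insert p (!ignore_set.contains p && !excluded.contains p)) := by
    funext d p
    by_cases h1 : p ∈ ignore_set
    · simp [h1]
    · have h1' : ignore_set.contains p = false :=
        Bool.eq_false_iff.2 (fun hb => h1 ((PySem.Set.contains_iff _ _).1 hb))
      by_cases h2 : p ∈ excluded
      · simp [h1, h2]
      · simp [h1, h2]
  rw [hstep]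
  have hnodup : allpb.Nodup := by
    rw [hall]
    exact pv_nodup_foldl_update _ _ (PySem.Set.nodup_ofList _)
  have hitems := PySem.Dict.items_foldl_insert_fresh allpb (fun p => p)
      (fun p => !ignore_set.contains p && !excluded.contains p) PySem.Dict.empty
      (fun a _ => rfl) (by simpa using hnodup)
  simpa using hitems
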